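-- pv_equiv track=rewrite | github.com/new-code-who-dis/algo_practice | greedy_algunos/iwant7figures.py | age_groups
-- ===== SOURCE A (Python) =====
-- def age_groups(index, ordered_ages, groups):
--     build_a_bear = [ordered_ages[index]]
--     next = index + 1
--     if next > (len(ordered_ages) - 1):
--         #traaassssssssssshhhhhhhhhh
--         groups.append(build_a_bear)
--         return groups
--     while ordered_ages[next] < (ordered_ages[index] + 3):
--         build_a_bear.append(ordered_ages[next])
--         next += 1
--
--     groups.append(build_a_bear)
--     return age_groups(next,ordered_ages,groups) #actually change order cause we should finish the loop on the last line cause #estillo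
-- ===== SOURCE B (Python) =====
-- def age_groups(index, ordered_ages, groups):
--     last = len(ordered_ages) - 1
--     cuts = [index]
--     while cuts[-1] < last:
--         i = cuts[-1]
--         top = ordered_ages[i] + 3
--         j = i + 1
--         while ordered_ages[j] < top:
--             j += 1
--         cuts.append(j)
--     return groups + [ordered_ages[a:b] for a, b in zip(cuts, cuts[1:])] + [[ordered_ages[cuts[-1]]]]
-- ===== Notes on version B (the rewrite author's own statement) =====
-- stated objective: alternative
-- what changed: B is a staged two-pass design: an iterative loop first records only the cut positions between groups, then all groups are materialised at once as slices over zip(cuts, cuts[1:]) plus the final singleton, replacing A's recursion that builds and appends each build_a_bear list element by element; B also returns a new list instead of mutating groups in place.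
import Mathlib
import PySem

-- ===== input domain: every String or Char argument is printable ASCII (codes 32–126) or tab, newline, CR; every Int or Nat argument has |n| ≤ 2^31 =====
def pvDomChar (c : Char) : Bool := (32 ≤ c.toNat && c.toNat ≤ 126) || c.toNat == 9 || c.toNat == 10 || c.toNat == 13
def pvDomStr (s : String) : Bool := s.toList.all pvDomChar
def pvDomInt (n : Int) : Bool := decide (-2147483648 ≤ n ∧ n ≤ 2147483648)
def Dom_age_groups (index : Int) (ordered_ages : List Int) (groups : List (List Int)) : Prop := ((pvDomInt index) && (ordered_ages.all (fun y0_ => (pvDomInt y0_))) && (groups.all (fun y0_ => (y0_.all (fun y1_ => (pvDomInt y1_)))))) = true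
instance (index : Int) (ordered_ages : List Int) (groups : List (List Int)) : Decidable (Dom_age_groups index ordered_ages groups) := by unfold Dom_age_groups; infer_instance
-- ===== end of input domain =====

-- B is a staged two-pass rewrite: it first computes only the cut positions, then builds every group as a
-- slice over zip(cuts, cuts[1:]); A recurses and mutates `groups` in place, B returns a fresh list, so the
-- equivalence proved here is about the RETURN value only.


-- ===== PORT A =====
-- the `while ordered_ages[next] < ordered_ages[index] + 3` loop; `none` = IndexError (excluded by Pre_);
-- fuel only totalizes the recursion (sufficient on every input admitted by Pre_)
def age_groups_while (fuel : Nat) (ages : List Int) (anchor : Int) (next : Int) (build : List Int) : Option (List Int × Int) :=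
  match fuel with
  | 0 => none
  | f+1 =>
    match PySem.List.pyGet? ages next with
    | none => none
    | some v => if v < anchor + 3 then age_groups_while f ages anchor (next + 1) (build ++ [v]) else some (build, next)

def age_groups_go (fuel : Nat) (index : Int) (ages : List Int) (groups : List (List Int)) : List (List Int) :=
  match fuel with
  | 0 => groups
  | f+1 =>
    match PySem.List.pyGet? ages index with
    | none => groups  -- IndexError on ordered_ages[index]; excluded by Pre_
    | some a0 =>
      if index + 1 > (ages.length : Int) - 1 then groups ++ [[a0]]
      else
        match age_groups_while (2 * ages.length + 2) ages a0 (index + 1) [a0] with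
        | none => groups  -- IndexError inside the while loop; excluded by Pre_
        | some (build, next) => age_groups_go f next ages (groups ++ [build])

def age_groups (index : Int) (ordered_ages : List Int) (groups : List (List Int)) : List (List Int) :=
  age_groups_go (ordered_ages.length + 1) index ordered_ages groups

-- ===== PORT B =====
-- Source B's inner scan `while ordered_ages[j] < top: j += 1` (unchecked, like A's; `none` = IndexError, excluded by Pre_)
def age_groups_alt_scan (fuel : Nat) (ages : List Int) (top : Int) (j : Int) : Int :=
  match fuel with
  | 0 => j
  | f+1 =>
    match PySem.List.pyGet? ages j with
    | none => j  -- IndexError; excluded by Pre_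
    | some v => if v < top then age_groups_alt_scan f ages top (j + 1) else j

-- Source B's outer `while cuts[-1] < last` loop, producing the cut positions appended after the start index;
-- fuel only totalizes it (each appended cut is strictly larger, so length+2+|index| suffices)
def age_groups_alt_cuts (fuel : Nat) (ages : List Int) (last : Int) (c : Int) : List Int :=
  match fuel with
  | 0 => []
  | f+1 =>
    if c < last then
      match PySem.List.pyGet? ages c with
      | none => []  -- IndexError on ordered_ages[i]; unreachable inside Pre_
      | some a =>
        let j := age_groups_alt_scan (ages.length + 2) ages (a + 3) (c + 1)
        j :: age_groups_alt_cuts f ages last j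
    else []

def age_groups_alt (index : Int) (ordered_ages : List Int) (groups : List (List Int)) : List (List Int) :=
  let last : Int := (ordered_ages.length : Int) - 1
  let cuts := index :: age_groups_alt_cuts (ordered_ages.length + 2 + index.natAbs) ordered_ages last index
  let pairs := (cuts.zip cuts.tail).map (fun p => PySem.List.slice ordered_ages (some p.1) (some p.2))
  match PySem.List.pyGet? ordered_ages (cuts.getLastD 0) with
  | none => groups  -- IndexError on ordered_ages[cuts[-1]]; excluded by Pre_
  | some a => groups ++ pairs ++ [[a]]

-- ===== PRECONDITION & SPEC =====
-- pvOk ages fuel i decides whether A's greedy run starting at anchor i returns: each group must stop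
-- strictly inside the list (found via findIdx on the dropped tail) until the last anchor is exactly the
-- last position; the Nat fuel (always called with ages.length, which suffices) only totalizes it.
def pvOk (ages : List Int) : Nat → Nat → Bool
  | 0, _ => false
  | f+1, i =>
    if i + 1 < ages.length then
      let d := (ages.drop (i+1)).findIdx (fun v => decide (ages.getD i 0 + 3 ≤ v))
      if i + 1 + d < ages.length then pvOk ages f (i+1+d) else false
    else true

-- Pre_ holds exactly when A returns: a nonnegative in-range start index and every greedy group before the
-- last stopping strictly inside the list; everywhere else (every negative start included — the wrapped scan
-- never reaches the return branch) A raises IndexError, so Pre_ excludes only raising inputs.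
def Pre_age_groups (index : Int) (ordered_ages : List Int) (groups : List (List Int)) : Prop :=
  0 ≤ index ∧ index < ordered_ages.length ∧ pvOk ordered_ages ordered_ages.length index.toNat = true
instance (index : Int) (ordered_ages : List Int) (groups : List (List Int)) : Decidable (Pre_age_groups index ordered_ages groups) := by unfold Pre_age_groups; infer_instance

def pvWitness_age_groups : Int × List Int × List (List Int) := (0, [0, 5, 10], [])

def Spec_age_groups (index : Int) (ordered_ages : List Int) (groups : List (List Int)) (out : List (List Int)) : Prop := out = age_groups_alt index ordered_ages groups
instance (index : Int) (ordered_ages : List Int) (groups : List (List Int)) (out : List (List Int)) : Decidable (Spec_age_groups index ordered_ages groups out) := by unfold Spec_age_groups; infer_instance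

-- ===== CLAIM (what is proved, stated in full; the proofs are below) =====
def Claim_equal_age_groups : Prop := ∀ (index : Int) (ordered_ages : List Int) (groups : List (List Int)), Dom_age_groups index ordered_ages groups → Pre_age_groups index ordered_ages groups → Spec_age_groups index ordered_ages groups (age_groups index ordered_ages groups)

-- ===== LEMMAS AND PROOFS =====

-- the groups B builds from a cut list: one slice per adjacent pair of cuts
def pvSlices (ages : List Int) (cuts : List Int) : List (List Int) :=
  (cuts.zip cuts.tail).map (fun p => PySem.List.slice ages (some p.1) (some p.2))

lemma alt_scan_eq (ages : List Int) (top : Int) :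
    ∀ (f j s : Nat), j ≤ s → s < ages.length →
    (∀ k, j ≤ k → k < s → ages.getD k 0 < top) →
    (top ≤ ages.getD s 0) →
    s - j < f →
    age_groups_alt_scan f ages top (j : Int) = (s : Int) := by
  intro f
  induction f with
  | zero => intro j s h1 h2 h3 h4 h5; omega
  | succ f ih =>
    intro j s h1 h2 h3 h4 h5
    unfold age_groups_alt_scan
    rcases eq_or_lt_of_le h1 with rfl | hjs
    · rw [List.getD_eq_getElem ages 0 h2] at h4
      simp [PySem.List.pyGet?_natCast, List.getElem?_eq_getElem h2]
      omega
    · have hjn : j < ages.length := by omega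
      have hv := h3 j le_rfl hjs
      rw [List.getD_eq_getElem ages 0 hjn] at hv
      simp only [PySem.List.pyGet?_natCast, List.getElem?_eq_getElem hjn, hv, if_pos]
      have hc : ((j:Int) + 1) = ((j+1 : Nat) : Int) := by push_cast; ring
      rw [hc]
      exact ih (j+1) s (by omega) h2 (fun k hk1 hk2 => h3 k (by omega) hk2) h4 (by omega)

lemma while_eq (ages : List Int) (anchor : Int) :
    ∀ (f j s : Nat) (acc : List Int), j ≤ s → s < ages.length →
    (∀ k, j ≤ k → k < s → ages.getD k 0 < anchor + 3) →
    (anchor + 3 ≤ ages.getD s 0) →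
    s - j < f →
    age_groups_while f ages anchor (j : Int) acc = some (acc ++ (ages.drop j).take (s - j), (s : Int)) := by
  intro f
  induction f with
  | zero => intro j s acc h1 h2 h3 h4 h5; omega
  | succ f ih =>
    intro j s acc h1 h2 h3 h4 h5
    unfold age_groups_while
    rcases eq_or_lt_of_le h1 with rfl | hjs
    · rw [List.getD_eq_getElem ages 0 h2] at h4
      simp [PySem.List.pyGet?_natCast, List.getElem?_eq_getElem h2]
      omega
    · have hjn : j < ages.length := by omega
      have hv := h3 j le_rfl hjs
      rw [List.getD_eq_getElem ages 0 hjn] at hv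
      simp only [PySem.List.pyGet?_natCast, List.getElem?_eq_getElem hjn, hv, if_pos]
      have hc : ((j:Int) + 1) = ((j+1 : Nat) : Int) := by push_cast; ring
      rw [hc, ih (j+1) s (acc ++ [ages[j]]) (by omega) h2 (fun k hk1 hk2 => h3 k (by omega) hk2) h4 (by omega)]
      have hdrop : ages.drop j = ages[j] :: ages.drop (j+1) := List.drop_eq_getElem_cons hjn
      have hsj : s - j = (s - (j+1)) + 1 := by omega
      rw [hdrop, hsj, List.take_succ_cons]
      simp

lemma go_eq (ages : List Int) :
    ∀ (m i fa fb F : Nat) (groups : List (List Int)),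
    i < ages.length →
    ages.length ≤ i + m → ages.length ≤ i + fa → ages.length ≤ i + fb →
    pvOk ages F i = true →
    age_groups_go fa (i : Int) ages groups
      = groups ++ pvSlices ages ((i : Int) :: age_groups_alt_cuts fb ages ((ages.length : Int) - 1) (i : Int))
          ++ [[ages.getD (ages.length - 1) 0]]
    ∧ ((i : Int) :: age_groups_alt_cuts fb ages ((ages.length : Int) - 1) (i : Int)).getLastD 0
        = ((ages.length - 1 : Nat) : Int) := by
  intro m
  induction m with
  | zero => intro i fa fb F groups hi hm _ _ _; omega
  | succ m ih =>
    intro i fa fb F groups hi hm hfa hfb hok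
    obtain ⟨fa, rfl⟩ : ∃ fa', fa = fa' + 1 := ⟨fa - 1, by omega⟩
    obtain ⟨fb, rfl⟩ : ∃ fb', fb = fb' + 1 := ⟨fb - 1, by omega⟩
    cases F with
    | zero => simp [pvOk] at hok
    | succ F =>
    have hget : PySem.List.pyGet? ages (i : Int) = some ages[i] := by
      simp [List.getElem?_eq_getElem hi]
    have hanchor : ages.getD i 0 = ages[i] := List.getD_eq_getElem ages 0 hi
    have hcast : ((i:Int) + 1) = ((i+1 : Nat) : Int) := by push_cast; ring
    simp only [pvOk] at hok
    by_cases hlast : i + 1 < ages.length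
    · -- a further group follows
      rw [if_pos hlast] at hok
      set d := (ages.drop (i+1)).findIdx (fun v => decide (ages.getD i 0 + 3 ≤ v)) with hd
      by_cases hstop : i + 1 + d < ages.length
      swap
      · rw [if_neg hstop] at hok; exact absurd hok (by simp)
      rw [if_pos hstop] at hok
      set s := i + 1 + d with hs
      have hdlen : d < (ages.drop (i+1)).length := by simp; omega
      have hmid : ∀ k, i + 1 ≤ k → k < s → ages.getD k 0 < ages.getD i 0 + 3 := by
        intro k hk1 hk2
        have hk : k < ages.length := by omega
        have h1 : k - (i+1) < d := by omega
        have h3 := List.not_of_lt_findIdx h1 (xs := ages.drop (i+1))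
        simp only [List.getElem_drop, decide_eq_false_iff_not, not_le,
          show i + 1 + (k - (i+1)) = k from by omega] at h3
        rw [List.getD_eq_getElem ages 0 hk]
        exact h3
      have hbound : ages.getD i 0 + 3 ≤ ages.getD s 0 := by
        have h3 := @List.findIdx_getElem _ (fun v => decide (ages.getD i 0 + 3 ≤ v)) (ages.drop (i+1)) (by omega)
        simp only [List.getElem_drop, decide_eq_true_eq] at h3
        rw [List.getD_eq_getElem ages 0 (show s < ages.length by omega)]
        exact h3
      rw [hanchor] at hmid hbound
      -- A takes one recursion step producing the group [ages[i]] ++ middle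
      have hcond : ¬ ((i:Int) + 1 > (ages.length : Int) - 1) := by omega
      have hA : age_groups_go (fa+1) (i:Int) ages groups
          = age_groups_go fa (s:Int) ages (groups ++ [[ages[i]] ++ (ages.drop (i+1)).take (s - (i+1))]) := by
        simp only [age_groups_go, hget, if_neg hcond]
        rw [hcast, while_eq ages ages[i] (2 * ages.length + 2) (i+1) s [ages[i]]
          (by omega) (by omega) hmid hbound (by omega)]
      -- B appends one more cut s
      have hiln : ((i:Int) < (ages.length : Int) - 1) := by omega
      have hB : age_groups_alt_cuts (fb+1) ages ((ages.length:Int) - 1) (i:Int)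
          = (s:Int) :: age_groups_alt_cuts fb ages ((ages.length:Int) - 1) (s:Int) := by
        simp only [age_groups_alt_cuts, if_pos hiln, hget]
        rw [hcast, alt_scan_eq ages (ages[i] + 3) (ages.length + 2) (i+1) s
          (by omega) (by omega) hmid hbound (by omega)]
      have hslice : PySem.List.slice ages (some (i:Int)) (some (s:Int))
          = [ages[i]] ++ (ages.drop (i+1)).take (s - (i+1)) := by
        rw [PySem.List.slice_natCast, List.drop_eq_getElem_cons hi,
            show s - i = (s - (i+1)) + 1 by omega, List.take_succ_cons]
        simp
      obtain ⟨ih1, ih2⟩ := ih s fa fb F (groups ++ [[ages[i]] ++ (ages.drop (i+1)).take (s - (i+1))])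
        (by omega) (by omega) (by omega) (by omega) hok
      constructor
      · rw [hA, hB, ih1]
        simp [pvSlices, hslice]
      · rw [hB, List.getLastD_cons, List.getLastD_cons]
        rw [List.getLastD_cons] at ih2
        exact ih2
    · -- i is the last index: A returns the singleton group, B's cut list stays [i]
      have hin : i + 1 = ages.length := by omega
      have hA : age_groups_go (fa+1) (i:Int) ages groups = groups ++ [[ages[i]]] := by
        simp only [age_groups_go, hget]
        rw [if_pos (by omega)]
      have hB : age_groups_alt_cuts (fb+1) ages ((ages.length:Int) - 1) (i:Int) = [] := by
        have : ¬ ((i:Int) < (ages.length : Int) - 1) := by omega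
        simp only [age_groups_alt_cuts, if_neg this]
      have hlastD : ages.getD (ages.length - 1) 0 = ages[i] := by
        rw [show ages.length - 1 = i by omega, hanchor]
      refine ⟨?_, ?_⟩
      · rw [hA, hB, hlastD]
        simp [pvSlices]
      · rw [hB, List.getLastD_cons, List.getLastD_nil]
        omega

-- ===== VERDICT (by name: the statement is the Claim_ definition above) =====
theorem age_groups_spec : Claim_equal_age_groups := by
  intro index ages groups _ hpre
  obtain ⟨h0, hlt, hok⟩ := hpre
  unfold Spec_age_groups age_groups age_groups_alt
  have hi : index = ((index.toNat : Nat) : Int) := (Int.toNat_of_nonneg h0).symm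
  rw [hi]
  dsimp only
  obtain ⟨h1, h2⟩ := go_eq ages (ages.length + 1) index.toNat (ages.length + 1)
    (ages.length + 2 + ((index.toNat : Int)).natAbs) ages.length groups (by omega) (by omega) (by omega) (by omega) hok
  rw [h1, h2]
  have hlen1 : ages.length - 1 < ages.length := by omega
  have hgetlast : PySem.List.pyGet? ages ((ages.length - 1 : Nat) : Int) = some ages[ages.length - 1] := by
    simp [List.getElem?_eq_getElem hlen1]
  simp only [hgetlast, List.getD_eq_getElem ages 0 hlen1, pvSlices]
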